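-- pv_equiv track=rewrite | github.com/tdhd/dssg2017 | webservice/ris.py | read_article
-- ===== SOURCE A (Python) =====
-- def read_article(lines):
--     article = {}
--     for line in lines:
--         keyValue = line.split("-")
--         if "-" in line and len(keyValue) == 2:
--             key,value = [t.strip() for t in keyValue]
--             if key in article: article[key] += "," + value
--             else: article[key] = value
--     return article
-- ===== SOURCE B (Python) =====
-- def read_article(lines):
--     pairs = []
--     for line in lines:
--         p = line.split("-")
--         if len(p) == 2:
--             pairs.append((p[0].strip(), p[1].strip()))
--     return {k: ",".join(v for key, v in pairs if key == k)
--             for k in dict.fromkeys(k for k, _ in pairs)}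
-- ===== Notes on version B (the rewrite author's own statement) =====
-- stated objective: alternative
-- what changed: Instead of A's single pass that updates a dict entry per line (contains-check then string concatenation), B first collects all valid stripped (key,value) pairs, then builds the result by one nested scan per distinct key (dict.fromkeys for first-occurrence order) joining all of that key's values with ','.
import Mathlib
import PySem

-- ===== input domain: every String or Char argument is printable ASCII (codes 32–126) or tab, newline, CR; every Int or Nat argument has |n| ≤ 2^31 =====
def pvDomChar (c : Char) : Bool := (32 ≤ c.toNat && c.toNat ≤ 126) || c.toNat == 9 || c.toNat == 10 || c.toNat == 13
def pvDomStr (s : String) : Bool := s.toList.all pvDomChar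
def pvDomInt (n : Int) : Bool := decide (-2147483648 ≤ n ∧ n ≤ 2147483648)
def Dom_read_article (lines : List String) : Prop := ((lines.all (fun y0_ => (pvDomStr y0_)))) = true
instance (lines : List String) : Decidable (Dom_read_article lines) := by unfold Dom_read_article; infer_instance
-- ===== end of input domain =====

-- B replaces A's incremental per-line dict update by a two-stage algorithm: collect all valid
-- stripped (key,value) pairs, then one nested scan per distinct key joins that key's values;
-- objective: alternative (same result, differently shaped computation).

-- ===== PORT A =====
-- loop body of A's 'for line in lines' (the dict 'article' is the accumulator)
def readArticleStep (article : PySem.Dict String String) (line : String) : PySem.Dict String String :=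
  let keyValue := (PySem.Str.split? line "-").getD []      -- line.split("-"); sep ≠ "" so always some
  if PySem.Str.isIn "-" line && keyValue.length == 2 then
    match keyValue.map PySem.Str.strip with                -- key,value = [t.strip() for t in keyValue]
    | [key, value] =>
      if article.contains key then
        article.insert key (article.getD key "" ++ "," ++ value)   -- article[key] += "," + value
      else
        article.insert key value                                   -- article[key] = value
    | _ => article                                         -- unreachable: guarded by len == 2
  else article

def read_article (lines : List String) : List (String × String) :=
  (lines.foldl readArticleStep PySem.Dict.empty).items

-- ===== PORT B =====
-- loop body of B's 'for line in lines' building 'pairs'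
def pairStep (acc : List (String × String)) (line : String) : List (String × String) :=
  let p := (PySem.Str.split? line "-").getD []             -- p = line.split("-")
  if p.length == 2 then
    acc ++ [(PySem.Str.strip (PySem.List.pyGetD p 0 ""), PySem.Str.strip (PySem.List.pyGetD p 1 ""))]
  else acc

def read_article_alt (lines : List String) : List (String × String) :=
  let pairs := lines.foldl pairStep []
  -- {k: ",".join(v for key, v in pairs if key == k) for k in dict.fromkeys(k for k, _ in pairs)}
  (PySem.Dict.ofList ((PySem.List.dedup (pairs.map Prod.fst)).map
    (fun k => (k, PySem.Str.join "," ((pairs.filter (fun q => q.1 == k)).map Prod.snd))))).items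

-- ===== PRECONDITION & SPEC =====
def Spec_read_article (lines : List String) (out : List (String × String)) : Prop := out = read_article_alt lines
instance (lines : List String) (out : List (String × String)) : Decidable (Spec_read_article lines out) := by unfold Spec_read_article; infer_instance

-- ===== CLAIM (what is proved, stated in full; the proofs are below) =====
def Claim_equal_read_article : Prop := ∀ (lines : List String), Dom_read_article lines → Spec_read_article lines (read_article lines)

-- ===== LEMMAS AND PROOFS =====

-- A's loop step rephrased over an already-parsed (key, value) pair
def stepP (d : PySem.Dict String String) (q : String × String) : PySem.Dict String String :=
  if d.contains q.1 then d.insert q.1 (d.getD q.1 "" ++ "," ++ q.2) else d.insert q.1 q.2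

-- the result B computes from a pair list
def targetOf (P : List (String × String)) : List (String × String) :=
  (PySem.List.dedup (P.map Prod.fst)).map
    (fun k => (k, PySem.Str.join "," ((P.filter (fun q => q.1 == k)).map Prod.snd)))

-- splitOn.go never meets the separator: one piece
theorem splitOn_go_no_sep (sep : List Char) : ∀ (fuel : Nat) (l cur : List Char) (acc : List (List Char)),
    (∀ j, sep.isPrefixOf (l.drop j) = false) →
    PySem.Chars.splitOn.go sep fuel l cur acc = ((cur.reverse ++ l) :: acc).reverse := by
  intro fuel
  induction fuel with
  | zero => intro l cur acc _; rfl
  | succ fuel ih =>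
    intro l cur acc h
    cases l with
    | nil =>
      rw [show PySem.Chars.splitOn.go sep (fuel+1) [] cur acc = (cur.reverse :: acc).reverse from rfl]
      simp
    | cons c rest =>
      have h0 : sep.isPrefixOf (c :: rest) = false := by simpa using h 0
      rw [show PySem.Chars.splitOn.go sep (fuel+1) (c :: rest) cur acc =
            (if sep.isPrefixOf (c :: rest) = true then
               PySem.Chars.splitOn.go sep fuel (List.drop sep.length (c :: rest)) [] (cur.reverse :: acc)
             else PySem.Chars.splitOn.go sep fuel rest (c :: cur) acc) from rfl]
      rw [h0]
      simp only [Bool.false_eq_true, if_false]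
      rw [ih rest (c :: cur) acc (fun j => by simpa using h (j + 1))]
      simp

theorem splitOn_of_not_isIn (s sep : List Char) (h : PySem.Chars.isIn sep s = false) :
    PySem.Chars.splitOn s sep = [s] := by
  have hnp : ∀ j, sep.isPrefixOf (s.drop j) = false := by
    intro j
    by_contra hj
    have hb : sep.isPrefixOf (s.drop j) = true := by
      cases hx : sep.isPrefixOf (s.drop j) with
      | true => rfl
      | false => exact absurd hx hj
    have : PySem.Chars.isIn sep s = true :=
      (PySem.Chars.exists_prefix_drop_iff_isIn sep s).mp ⟨j, List.isPrefixOf_iff_prefix.mp hb⟩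
    rw [h] at this; exact Bool.noConfusion this
  unfold PySem.Chars.splitOn
  rw [splitOn_go_no_sep sep (s.length + 1) s [] [] hnp]
  simp

-- A's redundant '"-" in line' conjunct is implied by len(split) == 2
theorem isIn_of_parts_len_two (line : String)
    (h : ((PySem.Str.split? line "-").getD []).length = 2) : PySem.Str.isIn "-" line = true := by
  rw [PySem.Str.isIn_eq]
  cases hin : PySem.Chars.isIn (("-" : String).toList) line.toList with
  | true => rfl
  | false =>
    exfalso
    have hs : PySem.Chars.splitOn line.toList ['-'] = [line.toList] :=
      splitOn_of_not_isIn _ _ (by simpa using hin)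
    simp [PySem.Str.split?, PySem.Chars.split?, show ("-" : String).toList = ['-'] from rfl, hs] at h

-- ",".join over a snoc / a singleton, at String level
theorem chars_join_append_singleton (sep x : List Char) :
    ∀ (l : List (List Char)), l ≠ [] →
      PySem.Chars.join sep (l ++ [x]) = PySem.Chars.join sep l ++ sep ++ x := by
  intro l
  induction l with
  | nil => intro h; exact absurd rfl h
  | cons a t ih =>
    intro _
    cases t with
    | nil => simp [PySem.Chars.join_cons_cons, PySem.Chars.join_singleton]
    | cons b u =>
      rw [show (a :: b :: u) ++ [x] = a :: (b :: (u ++ [x])) from rfl]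
      rw [PySem.Chars.join_cons_cons, PySem.Chars.join_cons_cons]
      rw [show b :: (u ++ [x]) = (b :: u) ++ [x] from rfl]
      rw [ih (by simp)]
      simp

theorem str_join_append_singleton (vs : List String) (v : String) (h : vs ≠ []) :
    PySem.Str.join "," (vs ++ [v]) = PySem.Str.join "," vs ++ "," ++ v := by
  rw [← String.toList_inj]
  simp only [PySem.Str.toList_join, String.toList_append, List.map_append, List.map_cons,
    List.map_nil]
  rw [chars_join_append_singleton _ _ _ (by simpa using h)]

theorem str_join_singleton (v : String) : PySem.Str.join "," [v] = v := by
  rw [← String.toList_inj, PySem.Str.toList_join]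
  simp [PySem.Chars.join_singleton]

-- A's per-line fold equals the per-pair fold over B's pair list
theorem fold_lines_eq_fold_pairs : ∀ (lines : List String) (acc : List (String × String)),
    lines.foldl readArticleStep ((acc.foldl stepP PySem.Dict.empty)) =
      (lines.foldl pairStep acc).foldl stepP PySem.Dict.empty := by
  intro lines
  induction lines with
  | nil => intro acc; rfl
  | cons line rest ih =>
    intro acc
    simp only [List.foldl_cons]
    by_cases hlen : ((PySem.Str.split? line "-").getD []).length = 2
    · obtain ⟨p, q, hpq⟩ := List.length_eq_two.mp hlen
      have hin := isIn_of_parts_len_two line hlen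
      have hstep : readArticleStep (acc.foldl stepP PySem.Dict.empty) line =
          (acc ++ [(PySem.Str.strip p, PySem.Str.strip q)]).foldl stepP PySem.Dict.empty := by
        simp only [readArticleStep, hpq, hin, List.map_cons, List.map_nil, List.length_cons,
          List.length_nil, Nat.reduceAdd, beq_self_eq_true, Bool.true_and, if_true,
          List.foldl_append, List.foldl_cons, List.foldl_nil]
        rfl
      have hpair : pairStep acc line = acc ++ [(PySem.Str.strip p, PySem.Str.strip q)] := by
        simp [pairStep, hpq, PySem.List.pyGetD]
      rw [hstep, hpair, ih]
    · have hstep : readArticleStep (acc.foldl stepP PySem.Dict.empty) line =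
          acc.foldl stepP PySem.Dict.empty := by
        simp only [readArticleStep]
        rw [if_neg (by simp [hlen])]
      have hpair : pairStep acc line = acc := by
        simp only [pairStep]
        rw [if_neg (by simp [hlen])]
      rw [hstep, hpair, ih]

-- keys of the target list
theorem map_fst_targetOf (P : List (String × String)) :
    (targetOf P).map Prod.fst = PySem.List.dedup (P.map Prod.fst) := by
  simp [targetOf, List.map_map, Function.comp_def]

-- dedup over a snoc
theorem dedup_append_singleton {α : Type} [BEq α] (l : List α) (x : α) :
    PySem.List.dedup (l ++ [x]) =
      if (PySem.List.dedup l).contains x then PySem.List.dedup l else PySem.List.dedup l ++ [x] := by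
  simp only [PySem.List.dedup_eq_ofList, PySem.Set.ofList_eq_foldl, List.foldl_append,
    List.foldl_cons, List.foldl_nil]
  rfl

-- the central invariant: folding A's step over a pair list yields B's target
theorem fold_pairs_items (P : List (String × String)) :
    (P.foldl stepP PySem.Dict.empty).items = targetOf P := by
  induction P using List.reverseRecOn with
  | nil => rfl
  | append_singleton P x ih =>
    obtain ⟨k, v⟩ := x
    have hkeys : (P.foldl stepP PySem.Dict.empty).keys = PySem.List.dedup (P.map Prod.fst) := by
      have h := congrArg (List.map Prod.fst) ih
      rw [map_fst_targetOf] at h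
      simpa only [PySem.Dict.keys] using h
    have hnd : (P.foldl stepP PySem.Dict.empty).keys.Nodup := by
      rw [hkeys]; exact PySem.List.nodup_dedup _
    have hcont : ∀ k, (P.foldl stepP PySem.Dict.empty).contains k = true ↔
        k ∈ PySem.List.dedup (P.map Prod.fst) := by
      intro k
      rw [PySem.Dict.contains_iff_mem_keys, hkeys]
    rw [List.foldl_append, List.foldl_cons, List.foldl_nil]
    simp only [stepP]
    by_cases hmem : k ∈ P.map Prod.fst
    · -- key already present: A replaces the entry in place, B's join gains a value
      have hdmem : k ∈ PySem.List.dedup (P.map Prod.fst) := (PySem.List.mem_dedup _ _).mpr hmem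
      have hc : (P.foldl stepP PySem.Dict.empty).contains k = true := (hcont k).mpr hdmem
      rw [if_pos hc]
      set vals := (P.filter (fun q => q.1 == k)).map Prod.snd with hvals
      have hvne : vals ≠ [] := by
        rw [hvals]
        simp only [ne_eq, List.map_eq_nil_iff, List.filter_eq_nil_iff, not_forall]
        obtain ⟨q, hq, hqk⟩ := List.exists_of_mem_map hmem
        exact ⟨q, hq, by simp [hqk]⟩
      have hgetD : (P.foldl stepP PySem.Dict.empty).getD k "" = PySem.Str.join "," vals := by
        apply PySem.Dict.getD_of_mem_items _ _ hnd
        rw [ih]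
        exact List.mem_map.mpr ⟨k, hdmem, rfl⟩
      rw [PySem.Dict.items_insert_of_contains _ _ hc, ih, hgetD]
      unfold targetOf
      rw [show (P ++ [(k, v)]).map Prod.fst = P.map Prod.fst ++ [k] by simp,
        dedup_append_singleton, if_pos (List.contains_iff_mem.mpr hdmem)]
      rw [List.map_map]
      apply List.map_congr_left
      intro k' hk'
      by_cases hkk : k' = k
      · simp only [Function.comp_def, hkk, beq_self_eq_true, if_true]
        rw [show (P ++ [(k, v)]).filter (fun q => q.1 == k) =
              P.filter (fun q => q.1 == k) ++ [(k, v)] by simp [List.filter_append]]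
        rw [List.map_append, ← hvals, List.map_singleton]
        rw [str_join_append_singleton vals v hvne]
      · simp only [Function.comp_def]
        rw [show (k' == k) = false from beq_eq_false_iff_ne.mpr hkk]
        simp only [Bool.false_eq_true, if_false]
        rw [show (P ++ [(k, v)]).filter (fun q => q.1 == k') =
              P.filter (fun q => q.1 == k') by
            simp only [List.filter_append, List.filter_cons, List.filter_nil]
            rw [show (((k, v) : String × String).1 == k') = false from
              beq_eq_false_iff_ne.mpr (Ne.symm hkk)]
            simp]
    · -- new key: A appends an entry, B's dedup gains a key
      have hdmem : k ∉ PySem.List.dedup (P.map Prod.fst) := fun h =>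
        hmem ((PySem.List.mem_dedup _ _).mp h)
      have hc : (P.foldl stepP PySem.Dict.empty).contains k = false := by
        cases hx : (P.foldl stepP PySem.Dict.empty).contains k with
        | false => rfl
        | true => exact absurd ((hcont k).mp hx) hdmem
      rw [if_neg (by simp [hc]), PySem.Dict.items_insert_of_not_contains _ _ hc, ih]
      unfold targetOf
      rw [show (P ++ [(k, v)]).map Prod.fst = P.map Prod.fst ++ [k] by simp,
        dedup_append_singleton,
        if_neg (by simpa using (fun h => hdmem (List.contains_iff_mem.mp h)))]
      rw [List.map_append, List.map_singleton]
      congr 1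
      · apply List.map_congr_left
        intro k' hk'
        have hkk : k' ≠ k := fun h => hdmem (h ▸ hk')
        rw [show (P ++ [(k, v)]).filter (fun q => q.1 == k') =
              P.filter (fun q => q.1 == k') by
            simp only [List.filter_append, List.filter_cons, List.filter_nil]
            rw [show (((k, v) : String × String).1 == k') = false from
              beq_eq_false_iff_ne.mpr (Ne.symm hkk)]
            simp]
      · have hfil : P.filter (fun q => q.1 == k) = [] := by
          rw [List.filter_eq_nil_iff]
          intro q hq hqk
          exact hmem (List.mem_map.mpr ⟨q, hq, by simpa using hqk⟩)
        rw [show (P ++ [(k, v)]).filter (fun q => q.1 == k) =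
              P.filter (fun q => q.1 == k) ++ [(k, v)] by simp [List.filter_append]]
        rw [hfil]
        simp [str_join_singleton]

theorem ofList_items_of_nodup (l : List (String × String)) (h : (l.map Prod.fst).Nodup) :
    (PySem.Dict.ofList l).items = l := by
  have hf := PySem.Dict.items_foldl_insert_fresh l Prod.fst Prod.snd PySem.Dict.empty
    (fun a _ => PySem.Dict.contains_empty _) h
  simpa [PySem.Dict.ofList, PySem.Dict.update] using hf

-- ===== VERDICT (by name: the statement is the Claim_ definition above) =====
theorem read_article_spec : Claim_equal_read_article := by
  intro lines _
  unfold Spec_read_article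
  simp only [read_article, read_article_alt]
  have h0 : (([] : List (String × String)).foldl stepP PySem.Dict.empty) = PySem.Dict.empty := rfl
  rw [← h0, fold_lines_eq_fold_pairs lines [], fold_pairs_items]
  rw [ofList_items_of_nodup]
  · rfl
  · rw [show ((PySem.List.dedup ((lines.foldl pairStep []).map Prod.fst)).map
        (fun k => (k, PySem.Str.join ","
          (((lines.foldl pairStep []).filter (fun q => q.1 == k)).map Prod.snd)))).map Prod.fst =
        PySem.List.dedup ((lines.foldl pairStep []).map Prod.fst) by
        simp [List.map_map, Function.comp_def]]
    exact PySem.List.nodup_dedup _
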